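-- pv_equiv track=rewrite | github.com/D1vyanshGupta/icml18-jtnn-py3.6.7-pytorch1.0-rdkit-2018.09 | jtnn/JTNNDecoder.py | have_slots
-- ===== SOURCE A (Python) =====
-- def have_slots(parent_slots, child_slots):
--     if len(parent_slots) > 2 and len(child_slots) > 2:
--         return True
--     matches = []
--     for idx_i, slot_1 in enumerate(parent_slots):
--         atom_1, charge_1, num_hydrogen_1 = slot_1
--         for idx_j, slot_2 in enumerate(child_slots):
--             atom_2, charge_2, num_hydrogen_2 = slot_2
--             if atom_1 == atom_2 and charge_1 == charge_2 and (atom_1 != "C" or num_hydrogen_1 + num_hydrogen_2 >= 4):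
--                 matches.append((idx_i, idx_j))
--
--     if len(matches) == 0:
--         return False
--
--     parent_match, child_match = zip(*matches)
--     if len(set(parent_match)) == 1 and 1 < len(parent_slots) <= 2:  # never remove atom from ring
--         parent_slots.pop(parent_match[0])
--     if len(set(child_match)) == 1 and 1 < len(child_slots) <= 2:  # never remove atom from ring
--         child_slots.pop(child_match[0])
--
--     return True
-- ===== SOURCE B (Python) =====
-- def have_slots(parent_slots, child_slots):
--     if len(parent_slots) > 2 and len(child_slots) > 2:
--         return True
--
--     def index(slots):
--         # (atom, charge) -> max hydrogen count among slots with that key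
--         d = {}
--         for atom, charge, h in slots:
--             k = (atom, charge)
--             if k not in d or h > d[k]:
--                 d[k] = h
--         return d
--
--     def matched(slots, idx):
--         # a slot matches iff some opposite slot shares (atom, charge) and,
--         # for carbon, the hydrogen sum can reach 4 (max partner suffices)
--         out = set()
--         for i, (atom, charge, h) in enumerate(slots):
--             mh = idx.get((atom, charge))
--             if mh is not None and (atom != "C" or h + mh >= 4):
--                 out.add(i)
--         return out
--
--     # both matched sets are computed before any mutation
--     matched_parents = matched(parent_slots, index(child_slots))
--     matched_children = matched(child_slots, index(parent_slots))
--
--     if not matched_parents: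
--         return False
--
--     if len(matched_parents) == 1 and 1 < len(parent_slots) <= 2:  # never remove atom from ring
--         parent_slots.pop(matched_parents.pop())
--     if len(matched_children) == 1 and 1 < len(child_slots) <= 2:  # never remove atom from ring
--         child_slots.pop(matched_children.pop())
--
--     return True
-- ===== Notes on version B (the rewrite author's own statement) =====
-- stated objective: alternative
-- what changed: B replaces the quadratic pairwise scan with a hash index: it builds a dict keyed by (atom, charge) holding the max hydrogen count of the opposite side, so each matched-index set is computed in one linear pass with O(1) lookups and no inner scan over the other list.
import Mathlib
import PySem

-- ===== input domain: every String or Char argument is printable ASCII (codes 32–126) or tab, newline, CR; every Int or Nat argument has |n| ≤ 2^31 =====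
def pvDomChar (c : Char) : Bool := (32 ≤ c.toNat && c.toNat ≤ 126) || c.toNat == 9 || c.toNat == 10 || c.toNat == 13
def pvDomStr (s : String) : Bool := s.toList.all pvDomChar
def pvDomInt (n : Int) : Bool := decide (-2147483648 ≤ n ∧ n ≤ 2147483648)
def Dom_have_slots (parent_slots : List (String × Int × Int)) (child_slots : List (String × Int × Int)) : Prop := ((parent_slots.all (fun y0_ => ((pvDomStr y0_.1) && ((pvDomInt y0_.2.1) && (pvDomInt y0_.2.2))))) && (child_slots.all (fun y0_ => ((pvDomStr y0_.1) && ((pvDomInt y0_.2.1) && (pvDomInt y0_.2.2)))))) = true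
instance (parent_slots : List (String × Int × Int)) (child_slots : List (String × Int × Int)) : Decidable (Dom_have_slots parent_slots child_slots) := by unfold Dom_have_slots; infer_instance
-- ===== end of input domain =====

-- B replaces A's pairwise scan by a (atom, charge) -> max-hydrogen dict index built once per
-- side; equivalence proved for the RETURN value only (both Pythons perform the same in-place
-- pops on the argument lists; not modeled here).


-- ===== PORT A =====
-- literal port of A's return value: nested loop over enumerate(...) collecting match pairs;
-- the subsequent singleton pops mutate the arguments in place and never change the returned Bool.
def have_slots (parent_slots : List (String × Int × Int)) (child_slots : List (String × Int × Int)) : Bool :=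
  if parent_slots.length > 2 ∧ child_slots.length > 2 then true
  else
    let matchList : List (Int × Int) :=
      (PySem.List.enumerate parent_slots).foldl (fun acc ip =>
        (PySem.List.enumerate child_slots).foldl (fun acc2 jc =>
          if ip.2.1 == jc.2.1 && ip.2.2.1 == jc.2.2.1 &&
             (ip.2.1 != "C" || decide (ip.2.2.2 + jc.2.2.2 ≥ 4))
          then acc2 ++ [(ip.1, jc.1)] else acc2) acc) []
    if matchList.length == 0 then false else true

-- ===== PORT B =====
-- one iteration of Source B's index(slots) loop: if k not in d or h > d[k]: d[k] = h
def idxStep (d : PySem.Dict (String × Int) Int) (s : String × Int × Int) :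
    PySem.Dict (String × Int) Int :=
  match d.get? (s.1, s.2.1) with
  | none => d.insert (s.1, s.2.1) s.2.2
  | some v => if s.2.2 > v then d.insert (s.1, s.2.1) s.2.2 else d

-- Source B's index(slots): a dict keyed by (atom, charge) holding the max hydrogen count
def buildIdx (slots : List (String × Int × Int)) : PySem.Dict (String × Int) Int :=
  slots.foldl idxStep PySem.Dict.empty

-- Source B's per-slot test inside matched(): mh = idx.get(k); mh is not None and (atom != "C" or h + mh >= 4)
def slotMatch (idx : PySem.Dict (String × Int) Int) (a : String × Int × Int) : Bool :=
  match idx.get? (a.1, a.2.1) with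
  | some mh => a.1 != "C" || decide (a.2.2 + mh ≥ 4)
  | none => false

-- literal port of B's return value: matched_parents built by one pass over enumerate(parent_slots)
-- with a lookup in the child index; matched_children and the in-place pops do not affect the
-- returned Bool and are not modeled.
def have_slots_alt (parent_slots : List (String × Int × Int)) (child_slots : List (String × Int × Int)) : Bool :=
  if parent_slots.length > 2 ∧ child_slots.length > 2 then true
  else
    let idx := buildIdx child_slots
    let matchedParents : PySem.Set Int :=
      (PySem.List.enumerate parent_slots).foldl (fun s ip =>
        if slotMatch idx ip.2 then PySem.Set.add s ip.1 else s) []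
    if matchedParents = [] then false else true

-- ===== PRECONDITION & SPEC =====
def Spec_have_slots (parent_slots : List (String × Int × Int)) (child_slots : List (String × Int × Int)) (out : Bool) : Prop := out = have_slots_alt parent_slots child_slots
instance (parent_slots : List (String × Int × Int)) (child_slots : List (String × Int × Int)) (out : Bool) : Decidable (Spec_have_slots parent_slots child_slots out) := by unfold Spec_have_slots; infer_instance

-- ===== CLAIM (what is proved, stated in full; the proofs are below) =====
def Claim_equal_have_slots : Prop := ∀ (parent_slots : List (String × Int × Int)) (child_slots : List (String × Int × Int)), Dom_have_slots parent_slots child_slots → Spec_have_slots parent_slots child_slots (have_slots parent_slots child_slots)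

-- ===== LEMMAS AND PROOFS =====

-- A's compatibility test between a parent slot and a child slot, as a predicate
def compatSlot (a b : String × Int × Int) : Bool :=
  a.1 == b.1 && a.2.1 == b.2.1 && (a.1 != "C" || decide (a.2.2 + b.2.2 ≥ 4))

-- one index step leaves other keys alone
lemma idxStep_get?_ne (d : PySem.Dict (String × Int) Int) (x : String × Int × Int)
    (k : String × Int) (hk : k ≠ (x.1, x.2.1)) :
    (idxStep d x).get? k = d.get? k := by
  unfold idxStep
  cases d.get? (x.1, x.2.1) with
  | none => exact PySem.Dict.get?_insert_of_ne _ _ hk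
  | some w =>
    by_cases hgt : x.2.2 > w
    · simp only [if_pos hgt]; exact PySem.Dict.get?_insert_of_ne _ _ hk
    · simp only [if_neg hgt]

-- one index step stores at the slot's key a value ≥ its hydrogen count, which is either
-- that count or a value already stored there
lemma idxStep_get?_self (d : PySem.Dict (String × Int) Int) (x : String × Int × Int) :
    ∃ u, (idxStep d x).get? (x.1, x.2.1) = some u ∧ x.2.2 ≤ u ∧
      (∀ w, d.get? (x.1, x.2.1) = some w → w ≤ u) ∧
      (u = x.2.2 ∨ d.get? (x.1, x.2.1) = some u) := by
  unfold idxStep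
  cases hd : d.get? (x.1, x.2.1) with
  | none =>
    refine ⟨x.2.2, PySem.Dict.get?_insert_self _ _ _, le_refl _, ?_, Or.inl rfl⟩
    intro w hw; cases hw
  | some w =>
    by_cases hgt : x.2.2 > w
    · refine ⟨x.2.2, ?_, le_refl _, ?_, Or.inl rfl⟩
      · simp only [if_pos hgt]; exact PySem.Dict.get?_insert_self _ _ _
      · intro w' hw'; injection hw' with h; omega
    · refine ⟨w, ?_, by omega, ?_, Or.inr rfl⟩
      · simp only [if_neg hgt]; exact hd
      · intro w' hw'; injection hw' with h; omega

-- every value stored by the index fold comes from the accumulator or from a slot of the list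
lemma buildIdx_fold_sound (l : List (String × Int × Int)) :
    ∀ (d : PySem.Dict (String × Int) Int) (k : String × Int) (v : Int),
    (l.foldl idxStep d).get? k = some v →
    d.get? k = some v ∨ ∃ s ∈ l, (s.1, s.2.1) = k ∧ s.2.2 = v := by
  induction l with
  | nil => intro d k v h; exact Or.inl h
  | cons x l ih =>
    intro d k v h
    rw [List.foldl_cons] at h
    rcases ih _ k v h with h' | ⟨s, hs, hk, hv⟩
    · by_cases hkx : k = (x.1, x.2.1)
      · subst hkx
        rcases idxStep_get?_self d x with ⟨u, hu, _, _, hcase⟩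
        rw [hu] at h'
        injection h' with h'
        subst h'
        rcases hcase with h | h
        · exact Or.inr ⟨x, List.mem_cons_self, rfl, h.symm⟩
        · exact Or.inl h
      · rw [idxStep_get?_ne d x k hkx] at h'
        exact Or.inl h'
    · exact Or.inr ⟨s, List.mem_cons_of_mem _ hs, hk, hv⟩

-- a value present in the accumulator survives the fold, possibly increased
lemma buildIdx_fold_mono (l : List (String × Int × Int)) :
    ∀ (d : PySem.Dict (String × Int) Int) (k : String × Int) (v : Int),
    d.get? k = some v →
    ∃ v', (l.foldl idxStep d).get? k = some v' ∧ v ≤ v' := by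
  induction l with
  | nil => intro d k v h; exact ⟨v, h, le_refl v⟩
  | cons x l ih =>
    intro d k v h
    rw [List.foldl_cons]
    by_cases hkx : k = (x.1, x.2.1)
    · subst hkx
      rcases idxStep_get?_self d x with ⟨u, hu, _, hdom, _⟩
      rcases ih _ _ u hu with ⟨v', h1, h2⟩
      exact ⟨v', h1, le_trans (hdom v h) h2⟩
    · exact ih _ k v (by rw [idxStep_get?_ne d x k hkx]; exact h)

-- every slot of the list is dominated by its key's entry in the built index
lemma buildIdx_dom (l : List (String × Int × Int)) :
    ∀ (d : PySem.Dict (String × Int) Int) (s : String × Int × Int), s ∈ l →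
    ∃ v, (l.foldl idxStep d).get? (s.1, s.2.1) = some v ∧ s.2.2 ≤ v := by
  induction l with
  | nil => intro d s h; exact absurd h List.not_mem_nil
  | cons x l ih =>
    intro d s hs
    rw [List.foldl_cons]
    rcases List.mem_cons.mp hs with h | h
    · subst h
      rcases idxStep_get?_self d s with ⟨u, hu, hle, _, _⟩
      rcases buildIdx_fold_mono l _ _ u hu with ⟨v', h1, h2⟩
      exact ⟨v', h1, le_trans hle h2⟩
    · exact ih _ s h

-- B's dict-lookup test agrees with A's any()-over-the-other-list test
lemma slotMatch_eq_any (a : String × Int × Int) (c : List (String × Int × Int)) :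
    slotMatch (buildIdx c) a = c.any (fun cs => compatSlot a cs) := by
  cases ha : c.any (fun cs => compatSlot a cs) with
  | true =>
    rcases List.any_eq_true.mp ha with ⟨cs, hcs, hc⟩
    simp only [compatSlot, Bool.and_eq_true, beq_iff_eq] at hc
    obtain ⟨⟨h1, h2⟩, h3⟩ := hc
    rcases buildIdx_dom c PySem.Dict.empty cs hcs with ⟨v, hv, hle⟩
    unfold slotMatch buildIdx
    rw [show (a.1, a.2.1) = (cs.1, cs.2.1) by rw [h1, h2], hv]
    by_cases hC : a.1 = "C"
    · have h4 : a.2.2 + cs.2.2 ≥ 4 := by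
        rcases Bool.or_eq_true_iff.mp h3 with h | h
        · exact absurd hC (by simpa using h)
        · exact of_decide_eq_true h
      have : a.2.2 + v ≥ 4 := by omega
      simp [this]
    · simp [hC]
  | false =>
    rw [List.any_eq_false] at ha
    unfold slotMatch
    cases hv : (buildIdx c).get? (a.1, a.2.1) with
    | none => rfl
    | some mh =>
      rcases buildIdx_fold_sound c PySem.Dict.empty _ _ hv with h | ⟨s, hs, hk, hval⟩
      · rw [PySem.Dict.get?_empty] at h; cases h
      · injection hk with hk1 hk2
        have hcomp := ha s hs
        subst hval
        simp only [compatSlot, hk1, hk2, beq_self_eq_true, Bool.true_and] at hcomp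
        simpa using hcomp

-- A's inner loop over one parent slot is empty iff no child slot is compatible with it
lemma inner_empty_iff (x : Int × (String × Int × Int)) (c : List (String × Int × Int)) :
    ((PySem.List.enumerate c).filter (fun jc =>
        x.2.1 == jc.2.1 && x.2.2.1 == jc.2.2.1 &&
        (x.2.1 != "C" || decide (x.2.2.2 + jc.2.2.2 ≥ 4))) = []
      ↔ c.any (fun cs => compatSlot x.2 cs) = false) := by
  rw [List.filter_eq_nil_iff, List.any_eq_false]
  constructor
  · intro h cs hcs
    rcases List.exists_of_mem_map (l := PySem.List.enumerate c) (f := (·.2))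
        (by rw [PySem.List.map_snd_enumerate]; exact hcs) with ⟨jc, hjc, hsnd⟩
    have := h jc hjc
    simpa [compatSlot, hsnd] using this
  · intro h jc hjc
    have hmem : jc.2 ∈ c := by
      rw [← PySem.List.map_snd_enumerate (xs := c) (s := 0)]
      exact List.mem_map_of_mem hjc
    simpa [compatSlot] using h jc.2 hmem

-- a fold of conditional Set.add is empty iff it started empty and no condition fired
lemma foldl_add_empty_iff {α β : Type} [BEq β] (p : α → Bool) (f : α → β)
    (l : List α) (s : PySem.Set β) :
    (l.foldl (fun s x => if p x then PySem.Set.add s (f x) else s) s = []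
      ↔ s = [] ∧ ∀ x ∈ l, p x = false) := by
  induction l generalizing s with
  | nil => simp
  | cons x l ih =>
    simp only [List.foldl_cons, ih, List.mem_cons]
    constructor
    · rintro ⟨hs, hall⟩
      by_cases hp : p x = true
      · exfalso
        rw [if_pos hp] at hs
        unfold PySem.Set.add at hs
        split at hs
        · rename_i hc; rw [hs] at hc; simp [PySem.Set.contains] at hc
        · simp at hs
      · simp only [Bool.not_eq_true] at hp
        rw [if_neg (by simp [hp])] at hs
        exact ⟨hs, fun y hy => hy.elim (fun h => h ▸ hp) (hall y)⟩
    · rintro ⟨hs, hall⟩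
      have hp := hall x (Or.inl rfl)
      rw [if_neg (by simp [hp])]
      exact ⟨hs, fun y hy => hall y (Or.inr hy)⟩

-- ===== VERDICT (by name: the statement is the Claim_ definition above) =====
theorem have_slots_spec : Claim_equal_have_slots := by
  intro p c _
  unfold Spec_have_slots have_slots have_slots_alt
  by_cases hbig : p.length > 2 ∧ c.length > 2
  · simp [hbig]
  · simp only [if_neg hbig]
    rw [show (fun (acc : List (Int × Int)) (ip : Int × (String × Int × Int)) =>
          (PySem.List.enumerate c).foldl (fun acc2 jc =>
            if ip.2.1 == jc.2.1 && ip.2.2.1 == jc.2.2.1 &&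
               (ip.2.1 != "C" || decide (ip.2.2.2 + jc.2.2.2 ≥ 4))
            then acc2 ++ [(ip.1, jc.1)] else acc2) acc)
        = (fun acc ip => acc ++ ((PySem.List.enumerate c).filter (fun jc =>
            ip.2.1 == jc.2.1 && ip.2.2.1 == jc.2.2.1 &&
            (ip.2.1 != "C" || decide (ip.2.2.2 + jc.2.2.2 ≥ 4)))).map (fun jc => (ip.1, jc.1)))
        from funext fun acc => funext fun ip => PySem.List.foldl_append_if _ _ _ _]
    rw [PySem.List.foldl_append_eq_flatMap]
    simp only [List.nil_append, List.length_eq_zero_iff, beq_iff_eq, List.flatMap_eq_nil_iff,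
      List.map_eq_nil_iff]
    have hiff : (∀ x ∈ PySem.List.enumerate p,
        (PySem.List.enumerate c).filter (fun jc =>
          x.2.1 == jc.2.1 && x.2.2.1 == jc.2.2.1 &&
          (x.2.1 != "C" || decide (x.2.2.2 + jc.2.2.2 ≥ 4))) = [])
        ↔ (∀ x ∈ PySem.List.enumerate p, slotMatch (buildIdx c) x.2 = false) := by
      refine forall₂_congr fun x _ => ?_
      rw [inner_empty_iff x c, slotMatch_eq_any]
    by_cases hall : ∀ x ∈ PySem.List.enumerate p, slotMatch (buildIdx c) x.2 = false
    · rw [if_pos (hiff.mpr hall),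
        if_pos ((foldl_add_empty_iff _ _ _ _).mpr ⟨rfl, hall⟩)]
    · rw [if_neg (fun h => hall (hiff.mp h)),
        if_neg (fun h => hall ((foldl_add_empty_iff _ _ _ _).mp h).2)]
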